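-- pv_equiv track=rewrite | github.com/Ze1598/Programming-challenges | programming_challenges/length_of_missing_array.py | length_of_missing_lst_alt
-- ===== SOURCE A (Python) =====
-- def length_of_missing_lst_alt (matrix):
-- 	'''
-- 	This method creates a list with all the lengths of the lists in the matrix.
-- 	Then, from the range [length_shortest_list, length_largest_list], the integer
-- 	that is not in the created list is the answer.
-- 	'''
-- 	# If the matrix is None or empty, return 0 right away
-- 	if matrix == None or matrix == []:
-- 		return 0
-- 	# Variables to hold the length of the shortest and longest\
-- 	# inner lists
-- 	min_len = float("inf")
-- 	max_len = float("-inf")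
-- 	# Variable to hold the sum of all the numbers in the range\
-- 	# [min_len, max_len]
-- 	real_sum = 0
-- 	# Variable to hold the sum of all lengths of the lists in the\
-- 	# matrix
-- 	actual_sum = 0
-- 	# List to hold the lengths of each list in the matrix
-- 	lengths = []
--
-- 	# Loop through the matrix to find the length of the shortest and\
-- 	# the longest lists and the length of each list, as well as to\
-- 	# check if any list is None or empty (if at least one is, return 0)
-- 	for lst in matrix:
-- 		if lst == None or lst == []:
-- 			return 0
-- 		if len(lst) < min_len:
-- 			min_len = len(lst)
-- 		if len(lst) > max_len:
-- 			max_len = len(lst)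
-- 		lengths.append(len(lst))
--
-- 	# Loop through all the integers between the length of the shortest\
-- 	# and largest lists found: when we find the integer that doesn't\
-- 	# have a list with a corresponding length in the matrix (i.e., the\
-- 	# integer is not in the `lengths` list), return that integer
-- 	for i in range(min_len, max_len):
-- 		if i not in lengths:
-- 			return i
-- ===== SOURCE B (Python) =====
-- def length_of_missing_lst_alt(matrix):
--     # If the matrix is None or empty, return 0 right away
--     if not matrix:
--         return 0
--     # Collect the length of every inner list (0 for a None/empty inner list)
--     lengths = []
--     for lst in matrix:
--         if not lst:
--             return 0
--         lengths.append(len(lst))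
--     # Sort the lengths and scan for the first gap
--     lengths.sort()
--     expected = lengths[0]
--     for n in lengths:
--         if expected < n:
--             return expected
--         if n == expected:
--             expected += 1
--     return None
-- ===== Notes on version B (the rewrite author's own statement) =====
-- stated objective: alternative
-- what changed: Replaces the second pass's membership scan over range(min,max) (a linear 'in lengths' test per candidate) with sorting the collected lengths once and a single gap-scan with an 'expected' counter; min/max tracking disappears.
import Mathlib
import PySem

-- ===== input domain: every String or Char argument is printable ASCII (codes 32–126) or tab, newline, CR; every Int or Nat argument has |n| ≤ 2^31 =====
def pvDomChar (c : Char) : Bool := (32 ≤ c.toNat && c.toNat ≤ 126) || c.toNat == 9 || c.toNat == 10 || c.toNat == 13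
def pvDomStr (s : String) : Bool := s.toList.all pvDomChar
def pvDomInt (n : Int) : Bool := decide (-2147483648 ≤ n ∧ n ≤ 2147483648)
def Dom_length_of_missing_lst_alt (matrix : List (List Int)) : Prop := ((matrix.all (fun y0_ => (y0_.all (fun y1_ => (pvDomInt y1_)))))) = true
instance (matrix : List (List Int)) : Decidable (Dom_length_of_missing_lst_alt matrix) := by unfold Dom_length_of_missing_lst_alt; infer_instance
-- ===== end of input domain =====

-- B replaces A's per-candidate membership scan over range(min,max) by sorting the lengths once
-- and a single gap-scan with an 'expected' counter (objective: alternative algorithm).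

-- ===== PORT A =====
-- min_len = float("inf") / max_len = float("-inf") are modelled as Option Int (none = not yet set);
-- the comparisons len < inf and len > -inf are True, which the 'none' branches render exactly.
def lomA_min (o : Option Int) (n : Int) : Option Int :=
  match o with
  | none => some n
  | some m => if n < m then some n else some m

def lomA_max (o : Option Int) (n : Int) : Option Int :=
  match o with
  | none => some n
  | some m => if m < n then some n else some m

-- first loop of A: early `return 0` on an empty inner list is `none`
def lomA_loop : List (List Int) → Option Int → Option Int → List Int →
    Option (Option Int × Option Int × List Int)
  | [], mn, mx, lengths => some (mn, mx, lengths)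
  | lst :: rest, mn, mx, lengths =>
    if lst = [] then none
    else lomA_loop rest (lomA_min mn (lst.length : Int)) (lomA_max mx (lst.length : Int))
           (lengths ++ [(lst.length : Int)])

-- second loop of A: first i in the range not in lengths
def lomA_scan : List Int → List Int → Option Int
  | [], _ => none
  | i :: rest, lengths => if i ∈ lengths then lomA_scan rest lengths else some i

def length_of_missing_lst_alt (matrix : List (List Int)) : Option Int :=
  if matrix = [] then some 0
  else
    match lomA_loop matrix none none [] with
    | none => some 0
    | some (mn, mx, lengths) =>
      match mn, mx with
      | some a, some b => lomA_scan (PySem.List.pyRange a b 1) lengths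
      | _, _ => none   -- unreachable: matrix is nonempty so both are set

-- ===== PORT B =====
-- first loop of B: collect lengths, `none` = early `return 0` on an empty inner list
def lomB_collect : List (List Int) → List Int → Option (List Int)
  | [], acc => some acc
  | lst :: rest, acc =>
    if lst = [] then none else lomB_collect rest (acc ++ [(lst.length : Int)])

-- gap scan of B over the sorted lengths
def lomB_scan : List Int → Int → Option Int
  | [], _ => none
  | n :: rest, expected =>
    if expected < n then some expected
    else if n = expected then lomB_scan rest (expected + 1)
    else lomB_scan rest expected

def length_of_missing_lst_alt_alt (matrix : List (List Int)) : Option Int :=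
  if matrix = [] then some 0
  else
    match lomB_collect matrix [] with
    | none => some 0
    | some lengths =>
      match PySem.List.sorted lengths (fun x => x) false with
      | [] => none   -- unreachable: matrix is nonempty so lengths is nonempty
      | e0 :: rest => lomB_scan (e0 :: rest) e0

-- ===== PRECONDITION & SPEC =====
def Spec_length_of_missing_lst_alt (matrix : List (List Int)) (out : Option Int) : Prop := out = length_of_missing_lst_alt_alt matrix
instance (matrix : List (List Int)) (out : Option Int) : Decidable (Spec_length_of_missing_lst_alt matrix out) := by unfold Spec_length_of_missing_lst_alt; infer_instance

-- ===== CLAIM (what is proved, stated in full; the proofs are below) =====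
def Claim_equal_length_of_missing_lst_alt : Prop := ∀ (matrix : List (List Int)), Dom_length_of_missing_lst_alt matrix → Spec_length_of_missing_lst_alt matrix (length_of_missing_lst_alt matrix)

-- ===== LEMMAS AND PROOFS =====

-- A's first loop on an all-nonempty matrix: folds of min/max and the appended lengths
lemma lomA_loop_some (matrix : List (List Int)) (h : ∀ l ∈ matrix, l ≠ []) :
    ∀ mn mx acc, lomA_loop matrix mn mx acc =
      some ((matrix.map (fun l => (l.length : Int))).foldl lomA_min mn,
            (matrix.map (fun l => (l.length : Int))).foldl lomA_max mx,
            acc ++ matrix.map (fun l => (l.length : Int))) := by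
  induction matrix with
  | nil => intro mn mx acc; simp [lomA_loop]
  | cons lst rest ih =>
    intro mn mx acc
    have hne : lst ≠ [] := h lst (by simp)
    simp only [lomA_loop, if_neg hne, List.map_cons, List.foldl_cons]
    rw [ih (fun l hl => h l (by simp [hl]))]
    simp

lemma lomA_loop_none (matrix : List (List Int)) (h : ¬ ∀ l ∈ matrix, l ≠ []) :
    ∀ mn mx acc, lomA_loop matrix mn mx acc = none := by
  induction matrix with
  | nil => exact absurd (by simp) h
  | cons lst rest ih =>
    intro mn mx acc
    by_cases hl : lst = []
    · simp [lomA_loop, hl]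
    · simp only [lomA_loop, if_neg hl]
      apply ih; intro hr; apply h; intro l hm
      rcases List.mem_cons.mp hm with h1 | h2
      · exact h1 ▸ hl
      · exact hr l h2

lemma lomB_collect_some (matrix : List (List Int)) (h : ∀ l ∈ matrix, l ≠ []) :
    ∀ acc, lomB_collect matrix acc = some (acc ++ matrix.map (fun l => (l.length : Int))) := by
  induction matrix with
  | nil => intro acc; simp [lomB_collect]
  | cons lst rest ih =>
    intro acc
    have hne : lst ≠ [] := h lst (by simp)
    simp only [lomB_collect, if_neg hne]
    rw [ih (fun l hl => h l (by simp [hl]))]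
    simp

lemma lomB_collect_none (matrix : List (List Int)) (h : ¬ ∀ l ∈ matrix, l ≠ []) :
    ∀ acc, lomB_collect matrix acc = none := by
  induction matrix with
  | nil => exact absurd (by simp) h
  | cons lst rest ih =>
    intro acc
    by_cases hl : lst = []
    · simp [lomB_collect, hl]
    · simp only [lomB_collect, if_neg hl]
      apply ih; intro hr; apply h; intro l hm
      rcases List.mem_cons.mp hm with h1 | h2
      · exact h1 ▸ hl
      · exact hr l h2

-- min fold: value, membership, lower bound
lemma lomA_min_fold (ms : List Int) :
    ∀ a : Int, ∃ m, ms.foldl lomA_min (some a) = some m ∧ (m = a ∨ m ∈ ms) ∧ m ≤ a ∧ ∀ x ∈ ms, m ≤ x := by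
  induction ms with
  | nil => intro a; exact ⟨a, by simp⟩
  | cons n rest ih =>
    intro a
    simp only [List.foldl_cons, lomA_min]
    by_cases hlt : n < a
    · simp only [if_pos hlt]
      obtain ⟨m, hfold, hmem, hle, hall⟩ := ih n
      refine ⟨m, hfold, ?_, by omega, ?_⟩
      · rcases hmem with h | h
        · exact Or.inr (by simp [h])
        · exact Or.inr (by simp [h])
      · intro x hx
        rcases List.mem_cons.mp hx with h | h
        · omega
        · exact hall x h
    · simp only [if_neg hlt]
      obtain ⟨m, hfold, hmem, hle, hall⟩ := ih a
      refine ⟨m, hfold, ?_, hle, ?_⟩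
      · rcases hmem with h | h
        · exact Or.inl h
        · exact Or.inr (by simp [h])
      · intro x hx
        rcases List.mem_cons.mp hx with h | h
        · omega
        · exact hall x h

-- max fold: value, membership, upper bound
lemma lomA_max_fold (ms : List Int) :
    ∀ a : Int, ∃ m, ms.foldl lomA_max (some a) = some m ∧ (m = a ∨ m ∈ ms) ∧ a ≤ m ∧ ∀ x ∈ ms, x ≤ m := by
  induction ms with
  | nil => intro a; exact ⟨a, by simp⟩
  | cons n rest ih =>
    intro a
    simp only [List.foldl_cons, lomA_max]
    by_cases hlt : a < n
    · simp only [if_pos hlt]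
      obtain ⟨m, hfold, hmem, hle, hall⟩ := ih n
      refine ⟨m, hfold, ?_, by omega, ?_⟩
      · rcases hmem with h | h
        · exact Or.inr (by simp [h])
        · exact Or.inr (by simp [h])
      · intro x hx
        rcases List.mem_cons.mp hx with h | h
        · omega
        · exact hall x h
    · simp only [if_neg hlt]
      obtain ⟨m, hfold, hmem, hle, hall⟩ := ih a
      refine ⟨m, hfold, ?_, hle, ?_⟩
      · rcases hmem with h | h
        · exact Or.inl h
        · exact Or.inr (by simp [h])
      · intro x hx
        rcases List.mem_cons.mp hx with h | h
        · omega
        · exact hall x h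

-- A's scan is a find?
lemma lomA_scan_eq_find (r lengths : List Int) :
    lomA_scan r lengths = r.find? (fun i => decide (i ∉ lengths)) := by
  induction r with
  | nil => simp [lomA_scan]
  | cons i rest ih =>
    by_cases h : i ∈ lengths
    · simp [lomA_scan, h, List.find?, ih]
    · simp [lomA_scan, h, List.find?]

lemma find?_ext (r : List Int) (p q : Int → Bool) (h : ∀ x ∈ r, p x = q x) :
    r.find? p = r.find? q := by
  induction r with
  | nil => simp
  | cons x rest ih =>
    have hx := h x (by simp)
    by_cases hp : p x = true
    · simp [List.find?, hp, hx ▸ hp]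
    · have hq : q x = false := by rw [← hx]; simpa using hp
      simp only [List.find?, Bool.not_eq_true] at *
      rw [hq, (by simpa using hp : p x = false)]
      exact ih (fun y hy => h y (by simp [hy]))

-- scan of all-smaller elements finds nothing
lemma lomB_scan_all_lt (s : List Int) :
    ∀ e, (∀ x ∈ s, x < e) → lomB_scan s e = none := by
  induction s with
  | nil => intro e _; simp [lomB_scan]
  | cons n rest ih =>
    intro e h
    have hn : n < e := h n (by simp)
    simp only [lomB_scan, if_neg (by omega : ¬ e < n), if_neg (by omega : ¬ n = e)]
    exact ih e (fun x hx => h x (by simp [hx]))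

-- KEY: the sorted gap-scan equals the first element of [e, M) missing from s
lemma lomB_scan_eq_find (s : List Int) :
    ∀ e M : Int, s.Pairwise (· ≤ ·) → (∀ x ∈ s, x ≤ M) →
      (∀ i : Int, e ≤ i → i < M → ∃ x ∈ s, i ≤ x) →
      lomB_scan s e = (PySem.List.pyRange e M 1).find? (fun i => decide (i ∉ s)) := by
  induction s with
  | nil =>
    intro e M _ _ h3
    have hMe : M ≤ e := by
      by_contra hlt
      obtain ⟨x, hx, _⟩ := h3 e le_rfl (by omega)
      simp at hx
    rw [PySem.List.pyRange_one_eq_nil hMe]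
    simp [lomB_scan]
  | cons L rest ih =>
    intro e M hs hub h3
    have hLrest : ∀ x ∈ rest, L ≤ x := (List.pairwise_cons.mp hs).1
    have hrest : rest.Pairwise (· ≤ ·) := (List.pairwise_cons.mp hs).2
    by_cases hlt : e < L
    · -- result: some e; e ∉ L :: rest and e < M
      have heM : e < M := lt_of_lt_of_le hlt (hub L (by simp))
      rw [PySem.List.pyRange_one_cons heM]
      have hnot : e ∉ L :: rest := by
        intro hmem
        rcases List.mem_cons.mp hmem with h | h
        · omega
        · have := hLrest e h; omega
      simp [lomB_scan, hlt, List.find?, hnot]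
    · by_cases heq : L = e
      · -- consume L = e, expected becomes e+1
        subst heq
        simp only [lomB_scan, if_neg hlt]
        by_cases heM : L < M
        · rw [PySem.List.pyRange_one_cons heM]
          have hmem : L ∈ L :: rest := by simp
          have step : lomB_scan rest (L + 1) =
              (PySem.List.pyRange (L+1) M 1).find? (fun i => decide (i ∉ rest)) := by
            apply ih (L+1) M hrest (fun x hx => hub x (by simp [hx]))
            intro i hi hiM
            obtain ⟨x, hx, hix⟩ := h3 i (by omega) hiM
            rcases List.mem_cons.mp hx with h | h
            · omega
            · exact ⟨x, h, hix⟩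
          rw [step]
          simp only [List.find?]
          rw [(by simp [hmem] : (decide (L ∉ L :: rest)) = false)]
          apply find?_ext
          intro x hx
          have hxge : L + 1 ≤ x := (PySem.List.mem_pyRange_one.mp hx).1
          have : (x ∈ L :: rest) ↔ (x ∈ rest) := by
            constructor
            · intro hm; rcases List.mem_cons.mp hm with h | h
              · omega
              · exact h
            · intro hm; simp [hm]
          simp [this]
        · -- e = L ≥ M: range empty, rest all ≤ M ≤ L < L+1
          rw [PySem.List.pyRange_one_eq_nil (by omega)]
          simp only [List.find?_nil]
          exact lomB_scan_all_lt rest (L+1)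
            (fun x hx => by have := hub x (by simp [hx]); omega)
      · -- L < e: skip duplicate
        have hLe : L < e := by omega
        simp only [lomB_scan, if_neg hlt, if_neg heq]
        have step : lomB_scan rest e =
            (PySem.List.pyRange e M 1).find? (fun i => decide (i ∉ rest)) := by
          apply ih e M hrest (fun x hx => hub x (by simp [hx]))
          intro i hi hiM
          obtain ⟨x, hx, hix⟩ := h3 i hi hiM
          rcases List.mem_cons.mp hx with h | h
          · omega
          · exact ⟨x, h, hix⟩
        rw [step]
        apply find?_ext
        intro x hx
        have hxge : e ≤ x := (PySem.List.mem_pyRange_one.mp hx).1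
        have : (x ∈ L :: rest) ↔ (x ∈ rest) := by
          constructor
          · intro hm; rcases List.mem_cons.mp hm with h | h
            · omega
            · exact h
          · intro hm; simp [hm]
        simp [this]

-- ===== VERDICT (by name: the statement is the Claim_ definition above) =====
theorem length_of_missing_lst_alt_spec : Claim_equal_length_of_missing_lst_alt := by
  intro matrix _
  unfold Spec_length_of_missing_lst_alt length_of_missing_lst_alt length_of_missing_lst_alt_alt
  by_cases hmat : matrix = []
  · simp [hmat]
  · simp only [if_neg hmat]
    by_cases hall : ∀ l ∈ matrix, l ≠ []
    · -- no empty inner list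
      rw [lomA_loop_some matrix hall none none [], lomB_collect_some matrix hall []]
      set ms : List Int := matrix.map (fun l => (l.length : Int)) with hms
      obtain ⟨l0, lrest, hmsne⟩ : ∃ l0 lrest, ms = l0 :: lrest := by
        cases hcase : ms with
        | nil =>
          exfalso
          have : matrix = [] := by
            cases matrix with
            | nil => rfl
            | cons a b => simp [hms] at hcase
          exact hmat this
        | cons a b => exact ⟨a, b, rfl⟩
      -- min/max folds
      obtain ⟨mn, hmnf, hmnmem, hmnle, hmnall⟩ := lomA_min_fold lrest l0
      obtain ⟨mx, hmxf, hmxmem, hmxge, hmxall⟩ := lomA_max_fold lrest l0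
      have hmn_mem : mn ∈ ms := by
        rw [hmsne]; rcases hmnmem with h | h
        · simp [h]
        · simp [h]
      have hmx_mem : mx ∈ ms := by
        rw [hmsne]; rcases hmxmem with h | h
        · simp [h]
        · simp [h]
      have hmn_all : ∀ x ∈ ms, mn ≤ x := by
        intro x hx; rw [hmsne] at hx
        rcases List.mem_cons.mp hx with h | h
        · omega
        · exact hmnall x h
      have hmx_all : ∀ x ∈ ms, x ≤ mx := by
        intro x hx; rw [hmsne] at hx
        rcases List.mem_cons.mp hx with h | h
        · omega
        · exact hmxall x h
      have hfoldmin : ms.foldl lomA_min none = some mn := by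
        rw [hmsne]; simpa [lomA_min] using hmnf
      have hfoldmax : ms.foldl lomA_max none = some mx := by
        rw [hmsne]; simpa [lomA_max] using hmxf
      simp only [List.nil_append, hfoldmin, hfoldmax]
      -- sorted side
      have hperm : (PySem.List.sorted ms (fun x => x) false).Perm ms :=
        PySem.List.sorted_perm ms (fun x => x) false
      have hsp : (PySem.List.sorted ms (fun x => x) false).Pairwise (· ≤ ·) := by
        simpa using PySem.List.sorted_pairwise ms (fun x => x)
      cases hcase : PySem.List.sorted ms (fun x => x) false with
      | nil =>
        exfalso
        have := hperm.length_eq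
        rw [hcase, hmsne] at this
        simp at this
      | cons e0 srest =>
        rw [hcase] at hperm hsp
        have hmem_s : ∀ x, x ∈ e0 :: srest ↔ x ∈ ms := fun x => hperm.mem_iff
        -- head of sorted = mn
        have he0 : e0 = mn := by
          have he0mem : e0 ∈ ms := (hmem_s e0).mp (by simp)
          have h1 : mn ≤ e0 := hmn_all e0 he0mem
          have h2 : e0 ≤ mn := by
            simpa using PySem.List.key_head_sorted_le ms (fun x => x) hcase mn hmn_mem
          omega
        -- apply the key lemma with M = mx
        have hkey := lomB_scan_eq_find (e0 :: srest) e0 mx hsp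
          (fun x hx => hmx_all x ((hmem_s x).mp hx))
          (fun i _ hiM => ⟨mx, (hmem_s mx).mpr hmx_mem, by omega⟩)
        show lomA_scan (PySem.List.pyRange mn mx 1) ms = lomB_scan (e0 :: srest) e0
        rw [hkey, lomA_scan_eq_find, he0]
        apply find?_ext
        intro x _
        simp [← hmem_s x, he0]
    · -- some empty inner list: both return 0
      rw [lomA_loop_none matrix hall none none [], lomB_collect_none matrix hall []]
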